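-- pv_equiv track=rewrite | github.com/nyucel/blm2010 | final/170401032.py | xi
-- ===== SOURCE A (Python) =====
-- def xi(derece): #Günlerin toplamı gibi düşünebiliriz
--     xkare=[]
--     xkare.append(derece)
--     for i in range(1,13): #formul x^2m ile bitiyor 6*2=12
--         q=0 #her satır için sıfırlıyor denklemleri oluşturmak adına
--         for j in range(derece):
--             q+=(j+1)**i
--         xkare.append(q)
--     return xkare
-- ===== SOURCE B (Python) =====
-- # Closed-form (Faulhaber) power sums: each sum_{j=1}^{n} j^i is an integer-valued
-- # polynomial in n; evaluate it directly instead of looping over range(derece).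
-- # Table entry i-1 holds (d, coeffs low-to-high) with sum = polynomial(n) // d.
-- _FAULHABER = [
--     (2,    [0, 1, 1]),
--     (6,    [0, 1, 3, 2]),
--     (4,    [0, 0, 1, 2, 1]),
--     (30,   [0, -1, 0, 10, 15, 6]),
--     (12,   [0, 0, -1, 0, 5, 6, 2]),
--     (42,   [0, 1, 0, -7, 0, 21, 21, 6]),
--     (24,   [0, 0, 2, 0, -7, 0, 14, 12, 3]),
--     (90,   [0, -3, 0, 20, 0, -42, 0, 60, 45, 10]),
--     (20,   [0, 0, -3, 0, 10, 0, -14, 0, 15, 10, 2]),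
--     (66,   [0, 5, 0, -33, 0, 66, 0, -66, 0, 55, 33, 6]),
--     (24,   [0, 0, 10, 0, -33, 0, 44, 0, -33, 0, 22, 12, 2]),
--     (2730, [0, -691, 0, 4550, 0, -9009, 0, 8580, 0, -5005, 0, 2730, 1365, 210]),
-- ]
--
-- def _poly(coeffs, x):
--     acc = 0
--     for c in reversed(coeffs):
--         acc = c + x * acc
--     return acc
--
-- def xi(derece):
--     if derece <= 0:
--         return [derece] + [0] * 12
--     return [derece] + [_poly(cs, derece) // d for d, cs in _FAULHABER]
-- ===== Notes on version B (the rewrite author's own statement) =====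
-- stated objective: faster
-- what changed: Replaces the O(derece) inner summation loops by Faulhaber closed-form polynomials evaluated once per power (Horner), with the empty-sum case derece<=0 handled directly.
import Mathlib
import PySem

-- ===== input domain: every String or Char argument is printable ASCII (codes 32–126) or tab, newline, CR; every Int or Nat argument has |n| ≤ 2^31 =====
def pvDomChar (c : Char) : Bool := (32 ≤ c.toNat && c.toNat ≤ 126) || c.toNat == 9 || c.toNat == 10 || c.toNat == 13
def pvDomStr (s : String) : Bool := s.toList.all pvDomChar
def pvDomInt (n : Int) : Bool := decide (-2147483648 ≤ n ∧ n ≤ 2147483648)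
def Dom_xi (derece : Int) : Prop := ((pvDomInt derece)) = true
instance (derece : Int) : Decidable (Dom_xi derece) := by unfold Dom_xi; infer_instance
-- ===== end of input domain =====

-- B replaces A's O(derece) summation loops by Faulhaber closed-form polynomials (O(1)); return values proved equal for every Int input.

-- ===== PORT A =====
def xi (derece : Int) : List Int :=
  (PySem.List.pyRange 1 13 1).foldl
    (fun xkare i =>
      xkare ++ [(PySem.List.pyRange 0 derece 1).foldl (fun q j => q + (j + 1) ^ i.toNat) 0])
    [derece]

-- ===== PORT B =====
-- (d, coefficients low-to-high): sum_{j=1}^{n} j^i = polynomial(n) // d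
def pvFaulhaberTable : List (Int × List Int) :=
  [(2, [0, 1, 1]),
    (6, [0, 1, 3, 2]),
    (4, [0, 0, 1, 2, 1]),
    (30, [0, -1, 0, 10, 15, 6]),
    (12, [0, 0, -1, 0, 5, 6, 2]),
    (42, [0, 1, 0, -7, 0, 21, 21, 6]),
    (24, [0, 0, 2, 0, -7, 0, 14, 12, 3]),
    (90, [0, -3, 0, 20, 0, -42, 0, 60, 45, 10]),
    (20, [0, 0, -3, 0, 10, 0, -14, 0, 15, 10, 2]),
    (66, [0, 5, 0, -33, 0, 66, 0, -66, 0, 55, 33, 6]),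
    (24, [0, 0, 10, 0, -33, 0, 44, 0, -33, 0, 22, 12, 2]),
    (2730, [0, -691, 0, 4550, 0, -9009, 0, 8580, 0, -5005, 0, 2730, 1365, 210])]

def pvPoly (cs : List Int) (x : Int) : Int := cs.foldr (fun c acc => c + x * acc) 0

def xi_alt (derece : Int) : List Int :=
  if derece ≤ 0 then derece :: List.replicate 12 0
  else derece :: pvFaulhaberTable.map (fun p => PySem.Int.floordiv (pvPoly p.2 derece) p.1)

-- ===== PRECONDITION & SPEC =====
def Spec_xi (derece : Int) (out : List Int) : Prop := out = xi_alt derece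
instance (derece : Int) (out : List Int) : Decidable (Spec_xi derece out) := by unfold Spec_xi; infer_instance

-- ===== CLAIM (what is proved, stated in full; the proofs are below) =====
def Claim_equal_xi : Prop := ∀ (derece : Int), Dom_xi derece → Spec_xi derece (xi derece)

-- ===== LEMMAS AND PROOFS =====

/-- The inner loop of A: q accumulated over range(derece) for power k. -/
def pvQ (k : Nat) (d : Int) : Int :=
  (PySem.List.pyRange 0 d 1).foldl (fun q j => q + (j + 1) ^ k) 0

theorem pvQ_nonpos (k : Nat) (d : Int) (h : d ≤ 0) : pvQ k d = 0 := by
  unfold pvQ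
  rw [PySem.List.pyRange_one_eq_nil h]
  rfl


theorem pvQ_succ (k : Nat) (n : Nat) :
    pvQ k ((n : Int) + 1) = pvQ k (n : Int) + ((n : Int) + 1) ^ k := by
  unfold pvQ
  rw [PySem.List.pyRange_one_succ_right (by exact_mod_cast Nat.zero_le n), List.foldl_append]
  rfl

theorem pvXi_eval (d : Int) :
    xi d = [d, pvQ 1 d, pvQ 2 d, pvQ 3 d, pvQ 4 d, pvQ 5 d, pvQ 6 d,
            pvQ 7 d, pvQ 8 d, pvQ 9 d, pvQ 10 d, pvQ 11 d, pvQ 12 d] := by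
  have h : PySem.List.pyRange 1 13 1 = [1,2,3,4,5,6,7,8,9,10,11,12] := by decide
  simp [xi, h, pvQ]

theorem pvL1 (n : Nat) : (2 : Int) * pvQ 1 (n:Int) = (1) * (n:Int) + (1) * (n:Int)^2 := by
  induction n with
  | zero => simp [pvQ_nonpos _ _ le_rfl]
  | succ n ih => push_cast; rw [pvQ_succ, mul_add, ih]; ring

theorem pvL2 (n : Nat) : (6 : Int) * pvQ 2 (n:Int) = (1) * (n:Int) + (3) * (n:Int)^2 + (2) * (n:Int)^3 := by
  induction n with
  | zero => simp [pvQ_nonpos _ _ le_rfl]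
  | succ n ih => push_cast; rw [pvQ_succ, mul_add, ih]; ring

theorem pvL3 (n : Nat) : (4 : Int) * pvQ 3 (n:Int) = (1) * (n:Int)^2 + (2) * (n:Int)^3 + (1) * (n:Int)^4 := by
  induction n with
  | zero => simp [pvQ_nonpos _ _ le_rfl]
  | succ n ih => push_cast; rw [pvQ_succ, mul_add, ih]; ring

theorem pvL4 (n : Nat) : (30 : Int) * pvQ 4 (n:Int) = (-1) * (n:Int) + (10) * (n:Int)^3 + (15) * (n:Int)^4 + (6) * (n:Int)^5 := by
  induction n with
  | zero => simp [pvQ_nonpos _ _ le_rfl]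
  | succ n ih => push_cast; rw [pvQ_succ, mul_add, ih]; ring

theorem pvL5 (n : Nat) : (12 : Int) * pvQ 5 (n:Int) = (-1) * (n:Int)^2 + (5) * (n:Int)^4 + (6) * (n:Int)^5 + (2) * (n:Int)^6 := by
  induction n with
  | zero => simp [pvQ_nonpos _ _ le_rfl]
  | succ n ih => push_cast; rw [pvQ_succ, mul_add, ih]; ring

theorem pvL6 (n : Nat) : (42 : Int) * pvQ 6 (n:Int) = (1) * (n:Int) + (-7) * (n:Int)^3 + (21) * (n:Int)^5 + (21) * (n:Int)^6 + (6) * (n:Int)^7 := by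
  induction n with
  | zero => simp [pvQ_nonpos _ _ le_rfl]
  | succ n ih => push_cast; rw [pvQ_succ, mul_add, ih]; ring

theorem pvL7 (n : Nat) : (24 : Int) * pvQ 7 (n:Int) = (2) * (n:Int)^2 + (-7) * (n:Int)^4 + (14) * (n:Int)^6 + (12) * (n:Int)^7 + (3) * (n:Int)^8 := by
  induction n with
  | zero => simp [pvQ_nonpos _ _ le_rfl]
  | succ n ih => push_cast; rw [pvQ_succ, mul_add, ih]; ring

theorem pvL8 (n : Nat) : (90 : Int) * pvQ 8 (n:Int) = (-3) * (n:Int) + (20) * (n:Int)^3 + (-42) * (n:Int)^5 + (60) * (n:Int)^7 + (45) * (n:Int)^8 + (10) * (n:Int)^9 := by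
  induction n with
  | zero => simp [pvQ_nonpos _ _ le_rfl]
  | succ n ih => push_cast; rw [pvQ_succ, mul_add, ih]; ring

theorem pvL9 (n : Nat) : (20 : Int) * pvQ 9 (n:Int) = (-3) * (n:Int)^2 + (10) * (n:Int)^4 + (-14) * (n:Int)^6 + (15) * (n:Int)^8 + (10) * (n:Int)^9 + (2) * (n:Int)^10 := by
  induction n with
  | zero => simp [pvQ_nonpos _ _ le_rfl]
  | succ n ih => push_cast; rw [pvQ_succ, mul_add, ih]; ring

theorem pvL10 (n : Nat) : (66 : Int) * pvQ 10 (n:Int) = (5) * (n:Int) + (-33) * (n:Int)^3 + (66) * (n:Int)^5 + (-66) * (n:Int)^7 + (55) * (n:Int)^9 + (33) * (n:Int)^10 + (6) * (n:Int)^11 := by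
  induction n with
  | zero => simp [pvQ_nonpos _ _ le_rfl]
  | succ n ih => push_cast; rw [pvQ_succ, mul_add, ih]; ring

theorem pvL11 (n : Nat) : (24 : Int) * pvQ 11 (n:Int) = (10) * (n:Int)^2 + (-33) * (n:Int)^4 + (44) * (n:Int)^6 + (-33) * (n:Int)^8 + (22) * (n:Int)^10 + (12) * (n:Int)^11 + (2) * (n:Int)^12 := by
  induction n with
  | zero => simp [pvQ_nonpos _ _ le_rfl]
  | succ n ih => push_cast; rw [pvQ_succ, mul_add, ih]; ring

theorem pvL12 (n : Nat) : (2730 : Int) * pvQ 12 (n:Int) = (-691) * (n:Int) + (4550) * (n:Int)^3 + (-9009) * (n:Int)^5 + (8580) * (n:Int)^7 + (-5005) * (n:Int)^9 + (2730) * (n:Int)^11 + (1365) * (n:Int)^12 + (210) * (n:Int)^13 := by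
  induction n with
  | zero => simp [pvQ_nonpos _ _ le_rfl]
  | succ n ih => push_cast; rw [pvQ_succ, mul_add, ih]; ring

/-- Exact division: if d * pvQ k n equals the polynomial value, floordiv recovers pvQ. -/
theorem pvClosed (d : Int) (k : Nat) {cs : List Int} {n : Int}
    (h : d * pvQ k n = pvPoly cs n) (hd : 0 < d) :
    PySem.Int.floordiv (pvPoly cs n) d = pvQ k n := by
  rw [PySem.Int.floordiv_eq_ediv_of_pos hd, ← h, Int.mul_ediv_cancel_left _ (by omega)]

-- ===== VERDICT (by name: the statement is the Claim_ definition above) =====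
theorem xi_spec : Claim_equal_xi := by
  intro derece _
  unfold Spec_xi
  rw [pvXi_eval]
  by_cases h0 : derece ≤ 0
  · simp [xi_alt, h0, pvQ_nonpos _ _ h0, List.replicate]
  · have h : derece = ((derece.toNat : Nat) : Int) := by omega
    unfold xi_alt
    rw [if_neg h0]
    simp only [pvFaulhaberTable, List.map]
    refine List.ext_getElem (by simp) ?_
    intro i hi _
    have hi' : i < 13 := by simpa using hi
    interval_cases i <;> simp only [List.getElem_cons_zero, List.getElem_cons_succ]
    all_goals (rw [h])
    · -- power 1
      exact (pvClosed 2 1 (by rw [pvL1 derece.toNat]; simp [pvPoly]; ring) (by norm_num)).symm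
    · -- power 2
      exact (pvClosed 6 2 (by rw [pvL2 derece.toNat]; simp [pvPoly]; ring) (by norm_num)).symm
    · -- power 3
      exact (pvClosed 4 3 (by rw [pvL3 derece.toNat]; simp [pvPoly]; ring) (by norm_num)).symm
    · -- power 4
      exact (pvClosed 30 4 (by rw [pvL4 derece.toNat]; simp [pvPoly]; ring) (by norm_num)).symm
    · -- power 5
      exact (pvClosed 12 5 (by rw [pvL5 derece.toNat]; simp [pvPoly]; ring) (by norm_num)).symm
    · -- power 6
      exact (pvClosed 42 6 (by rw [pvL6 derece.toNat]; simp [pvPoly]; ring) (by norm_num)).symm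
    · -- power 7
      exact (pvClosed 24 7 (by rw [pvL7 derece.toNat]; simp [pvPoly]; ring) (by norm_num)).symm
    · -- power 8
      exact (pvClosed 90 8 (by rw [pvL8 derece.toNat]; simp [pvPoly]; ring) (by norm_num)).symm
    · -- power 9
      exact (pvClosed 20 9 (by rw [pvL9 derece.toNat]; simp [pvPoly]; ring) (by norm_num)).symm
    · -- power 10
      exact (pvClosed 66 10 (by rw [pvL10 derece.toNat]; simp [pvPoly]; ring) (by norm_num)).symm
    · -- power 11
      exact (pvClosed 24 11 (by rw [pvL11 derece.toNat]; simp [pvPoly]; ring) (by norm_num)).symm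
    · -- power 12
      exact (pvClosed 2730 12 (by rw [pvL12 derece.toNat]; simp [pvPoly]; ring) (by norm_num)).symm
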